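-- pv_equiv track=rewrite | github.com/42jasuh/ALGO | 1550-three-consecutive-odds/1550-three-consecutive-odds.py | threeConsecutiveOdds
-- ===== SOURCE A (Python) =====
-- from typing import List
--
-- def threeConsecutiveOdds(arr: List[int]) -> bool:
--     total = 0
--     consecutive = True
--     for n in arr:
--         if n % 2 == 1:
--             total += 1
--             consecutive = True
--         else:
--             consecutive = False
--             total = 0
--         if total >= 3 and consecutive:
--             return True
--     return False
-- ===== SOURCE B (Python) =====
-- from typing import List
--
-- def threeConsecutiveOdds(arr: List[int]) -> bool:
--     # Sliding window of width 3 over zipped shifted copies (no counter state machine).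
--     return any(a % 2 == 1 and b % 2 == 1 and c % 2 == 1
--                for a, b, c in zip(arr, arr[1:], arr[2:]))
-- ===== Notes on version B (the rewrite author's own statement) =====
-- stated objective: idiomatic
-- what changed: Replaced the running counter/flag state machine with early return by a stateless sliding-window any() over zip(arr, arr[1:], arr[2:]) checking three odd neighbours.
import Mathlib
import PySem

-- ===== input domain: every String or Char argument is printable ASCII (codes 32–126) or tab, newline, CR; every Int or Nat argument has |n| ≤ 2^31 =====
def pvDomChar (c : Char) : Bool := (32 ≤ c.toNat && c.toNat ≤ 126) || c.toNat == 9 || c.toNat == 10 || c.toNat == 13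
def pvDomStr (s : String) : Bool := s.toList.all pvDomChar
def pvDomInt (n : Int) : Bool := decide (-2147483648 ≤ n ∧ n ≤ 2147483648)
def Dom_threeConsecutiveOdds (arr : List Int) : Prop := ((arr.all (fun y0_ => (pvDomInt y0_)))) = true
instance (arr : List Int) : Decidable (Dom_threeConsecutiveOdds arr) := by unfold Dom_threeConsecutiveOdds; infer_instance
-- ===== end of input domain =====

-- B replaces A's running counter/flag state machine by a stateless sliding window of width 3 (idiomatic; same cost).

-- ===== PORT A =====
-- the for-loop with early return, carrying (total, consecutive) exactly as A does
def pvALoop : List Int → Int → Bool → Bool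
  | [], _, _ => false
  | n :: rest, total, _ =>
    let st := if PySem.Int.mod n 2 == 1 then (total + 1, true) else ((0 : Int), false)
    if (decide (st.1 ≥ 3)) && st.2 then true else pvALoop rest st.1 st.2

def threeConsecutiveOdds (arr : List Int) : Bool := pvALoop arr 0 true

-- ===== PORT B =====
-- zip(arr, arr[1:], arr[2:]) yields exactly the consecutive triples; any(...) is the disjunction
def pvBGo : List Int → Bool
  | a :: b :: c :: rest =>
    ((PySem.Int.mod a 2 == 1) && (PySem.Int.mod b 2 == 1) && (PySem.Int.mod c 2 == 1))
      || pvBGo (b :: c :: rest)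
  | _ => false

def threeConsecutiveOdds_alt (arr : List Int) : Bool := pvBGo arr

-- ===== PRECONDITION & SPEC =====
def Spec_threeConsecutiveOdds (arr : List Int) (out : Bool) : Prop := out = threeConsecutiveOdds_alt arr
instance (arr : List Int) (out : Bool) : Decidable (Spec_threeConsecutiveOdds arr out) := by unfold Spec_threeConsecutiveOdds; infer_instance

-- ===== CLAIM (what is proved, stated in full; the proofs are below) =====
def Claim_equal_threeConsecutiveOdds : Prop := ∀ (arr : List Int), Dom_threeConsecutiveOdds arr → Spec_threeConsecutiveOdds arr (threeConsecutiveOdds arr)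

-- ===== LEMMAS AND PROOFS =====

theorem pvMod2 (a : Int) : PySem.Int.mod a 2 = a % 2 :=
  PySem.Int.mod_eq_emod_of_pos (by norm_num)

-- the stored flag is overwritten before use, so its incoming value is irrelevant
theorem pvALoop_flag (r : List Int) (t : Int) : pvALoop r t false = pvALoop r t true := by
  cases r <;> rfl

theorem pvALoop_step (a : Int) (r : List Int) (t : Int) (c : Bool) :
    pvALoop (a :: r) t c =
      if a % 2 = 1 then
        (if 3 ≤ t + 1 then true else pvALoop r (t + 1) true)
      else pvALoop r 0 true := by
  by_cases ha : a % 2 = 1 <;>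
    by_cases ht : (3 : Int) ≤ t + 1 <;>
      simp [pvALoop, ha, ht, pvALoop_flag]

-- head-run helpers describing pvALoop with 1 resp. 2 odd-credits already accumulated
def pvHead1 : List Int → Bool
  | a :: _ => a % 2 == 1
  | _ => false

def pvHead2 : List Int → Bool
  | a :: b :: _ => (a % 2 == 1) && (b % 2 == 1)
  | _ => false

theorem pvBGo_step (a b c : Int) (r : List Int) :
    pvBGo (a :: b :: c :: r) =
      (((a % 2 == 1) && (b % 2 == 1) && (c % 2 == 1)) || pvBGo (b :: c :: r)) := by
  simp [pvBGo]

theorem pvALoop_char (arr : List Int) :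
    pvALoop arr 0 true = pvBGo arr ∧
    pvALoop arr 1 true = (pvHead2 arr || pvBGo arr) ∧
    pvALoop arr 2 true = (pvHead1 arr || pvBGo arr) := by
  induction arr with
  | nil => simp [pvALoop, pvBGo, pvHead1, pvHead2]
  | cons a r ih =>
    obtain ⟨ih0, ih1, ih2⟩ := ih
    rw [pvALoop_step a r 0, pvALoop_step a r 1, pvALoop_step a r 2]
    by_cases ha : a % 2 = 1
    · simp only [ha, if_true,
        show ¬ ((3:Int) ≤ 0 + 1) by decide,
        show (3:Int) ≤ 2 + 1 by decide, show (0:Int) + 1 = 1 by decide, show (1:Int) + 1 = 2 by decide,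
        if_neg, ite_false, not_false_iff, ih0, ih1, ih2]
      cases r with
      | nil => simp [pvBGo, pvHead1, pvHead2, ha]
      | cons b r' =>
        cases r' with
        | nil =>
          by_cases hb : b % 2 = 1 <;>
            simp [pvBGo, pvHead1, pvHead2, pvMod2, ha, hb]
        | cons c r'' =>
          have hA : (a % 2 == 1) = true := by simp [ha]
          rw [pvBGo_step]
          by_cases hb : b % 2 = 1 <;>
            by_cases hc : c % 2 = 1 <;>
            · have hB : (b % 2 == 1) = (if b % 2 = 1 then true else false) := by
                by_cases h : b % 2 = 1 <;> simp [h]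
              have hC : (c % 2 == 1) = (if c % 2 = 1 then true else false) := by
                by_cases h : c % 2 = 1 <;> simp [h]
              refine ⟨?_, ?_, ?_⟩ <;>
                simp only [pvBGo_step, pvHead1, pvHead2, hA, hB, hC, hb, hc,
                  ite_true, ite_false] <;>
                cases pvBGo (b :: c :: r'') <;> simp
    · have hA : (a % 2 == 1) = false := by simp [ha]
      simp only [ha, ite_false, ih0]
      refine ⟨?_, ?_, ?_⟩ <;>
        · cases r with
          | nil => simp [pvBGo, pvHead1, pvHead2, hA]
          | cons b r' =>
            cases r' with
            | nil => simp [pvBGo, pvHead1, pvHead2, hA]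
            | cons c r'' => simp [pvBGo_step, pvHead1, pvHead2, hA]
-- ===== VERDICT (by name: the statement is the Claim_ definition above) =====
theorem threeConsecutiveOdds_spec : Claim_equal_threeConsecutiveOdds := by
  intro arr _
  show threeConsecutiveOdds arr = threeConsecutiveOdds_alt arr
  exact (pvALoop_char arr).1
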